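-- pv_equiv track=rewrite | github.com/BOTAGK/Jezyki_Skryptowe | List2/findMostActiveSession.py | get_most_active_session
-- ===== SOURCE A (Python) =====
-- def get_most_active_session(log):
--     if not isinstance(log, dict):
--         raise TypeError("log musi byc slownikiem")
--
--     most_active_uid = None
--     max_requests = 0
--
--     for uid, entries in log.items():
--         if not isinstance(entries, list):
--             raise TypeError("Sesja musi byc listą")
--
--         num_requests = len(entries)
--         if num_requests > max_requests:
--             max_requests = num_requests
--             most_active_uid = uid
--
--     if most_active_uid is None:
--         return None
--
--     return most_active_uid, max_requests
-- ===== SOURCE B (Python) =====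
-- def get_most_active_session(log):
--     if not isinstance(log, dict):
--         raise TypeError("log musi byc slownikiem")
--     items = []
--     for uid, entries in log.items():
--         if not isinstance(entries, list):
--             raise TypeError("Sesja musi byc listą")
--         items.append((uid, len(entries)))
--     ranked = sorted(items, key=lambda kv: kv[1], reverse=True)
--     if not ranked or ranked[0][1] == 0:
--         return None
--     return ranked[0]
-- ===== Notes on version B (the rewrite author's own statement) =====
-- stated objective: alternative
-- what changed: Selection by sorting: B builds (uid, count) pairs, stably sorts them by count in descending order, and takes the first element (stability makes the head the first maximum, matching A's strict-> running-max loop), instead of A's single-pass running-maximum accumulator.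
import Mathlib
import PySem

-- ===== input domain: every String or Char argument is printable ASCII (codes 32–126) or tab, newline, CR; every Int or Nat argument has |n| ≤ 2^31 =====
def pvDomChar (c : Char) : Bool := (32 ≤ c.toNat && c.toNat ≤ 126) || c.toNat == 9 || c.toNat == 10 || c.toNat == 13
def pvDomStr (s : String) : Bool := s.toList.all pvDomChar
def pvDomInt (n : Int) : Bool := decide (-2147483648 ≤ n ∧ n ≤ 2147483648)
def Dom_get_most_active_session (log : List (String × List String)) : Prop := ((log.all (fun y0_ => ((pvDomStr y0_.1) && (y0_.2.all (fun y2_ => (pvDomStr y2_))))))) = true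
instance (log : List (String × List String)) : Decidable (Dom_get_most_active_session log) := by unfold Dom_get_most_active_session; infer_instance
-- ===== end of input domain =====

-- B selects by sorting: it builds (uid, count) pairs, stably sorts them by count descending and takes the head,
-- instead of A's single-pass running-maximum accumulator (alternative decomposition; same result).

-- ===== PORT A =====
-- A's loop state: (most_active_uid, max_requests); update on strictly greater length.
def get_most_active_session (log : List (String × List String)) : Option (String × Int) :=
  let st := log.foldl
    (fun (acc : Option String × Int) uid_entries =>
      let num_requests : Int := uid_entries.2.length
      if num_requests > acc.2 then (some uid_entries.1, num_requests) else acc)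
    (none, 0)
  match st.1 with
  | none => none
  | some uid => some (uid, st.2)

-- ===== PORT B =====
-- items = [(uid, len(entries))…]; ranked = sorted(items, key=count, reverse=True); guard empty/zero; return ranked[0].
def get_most_active_session_alt (log : List (String × List String)) : Option (String × Int) :=
  let items : List (String × Int) := log.map (fun kv => (kv.1, (kv.2.length : Int)))
  let ranked := PySem.List.sorted items (fun kv => kv.2) true
  match ranked with
  | [] => none
  | b :: _ => if b.2 = 0 then none else some b

-- ===== PRECONDITION & SPEC =====
def Spec_get_most_active_session (log : List (String × List String)) (out : Option (String × Int)) : Prop := out = get_most_active_session_alt log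
instance (log : List (String × List String)) (out : Option (String × Int)) : Decidable (Spec_get_most_active_session log out) := by unfold Spec_get_most_active_session; infer_instance

-- ===== CLAIM (what is proved, stated in full; the proofs are below) =====
def Claim_equal_get_most_active_session : Prop := ∀ (log : List (String × List String)), Dom_get_most_active_session log → Spec_get_most_active_session log (get_most_active_session log)

-- ===== LEMMAS AND PROOFS =====

-- first-maximum fold over the original pairs (strict '<' keeps the first maximum, like A's loop)
def pvBestFold (l : List (String × List String)) (b : String × List String) : String × List String :=
  l.foldl (fun m x => if (m.2.length : Int) < (x.2.length : Int) then x else m) b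

-- A's state corresponding to a current best element
def pvStateOf (b : String × List String) : Option String × Int :=
  (if b.2.length = 0 then none else some b.1, (b.2.length : Int))

-- the head of B's descending stable insertion sort, computed as a first-maximum fold of the heads
lemma head_foldl_insertBy (l : List (String × Int)) (y : String × Int) (ys : List (String × Int)) :
    (l.foldl (fun acc x => PySem.List.insertBy (fun a b => decide (b.2 < a.2)) x acc) (y :: ys)).head?
      = some (l.foldl (fun m x => if m.2 < x.2 then x else m) y) := by
  induction l generalizing y ys with
  | nil => simp
  | cons x t ih =>
      simp only [List.foldl_cons, PySem.List.insertBy]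
      by_cases h : y.2 < x.2
      · simp [h, ih]
      · simp [h, ih]

lemma head_sorted_rev (i : String × Int) (rest : List (String × Int)) :
    (PySem.List.sorted (i :: rest) (fun kv => kv.2) true).head?
      = some (rest.foldl (fun m x => if m.2 < x.2 then x else m) i) := by
  rw [PySem.List.sorted_rev_eq_foldl_insertBy]
  simp only [List.foldl_cons, PySem.List.insertBy]
  exact head_foldl_insertBy rest i []

-- B's mapping commutes with the first-maximum fold
lemma foldl_map_best (t : List (String × List String)) (x : String × List String) :
    (t.map (fun kv => (kv.1, (kv.2.length : Int)))).foldl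
        (fun m y => if m.2 < y.2 then y else m) (x.1, (x.2.length : Int))
      = ((pvBestFold t x).1, ((pvBestFold t x).2.length : Int)) := by
  rw [List.foldl_map]
  induction t generalizing x with
  | nil => rfl
  | cons y t ih =>
      simp only [List.foldl_cons, pvBestFold]
      by_cases h : ((x.2.length : Int)) < ((y.2.length : Int))
      · simp only [if_pos h]; exact ih y
      · simp only [if_neg h]; exact ih x

-- A's fold tracks the first-maximum element
lemma foldA_stateOf (l : List (String × List String)) (b : String × List String) :
    l.foldl
      (fun (acc : Option String × Int) uid_entries =>
        let num_requests : Int := uid_entries.2.length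
        if num_requests > acc.2 then (some uid_entries.1, num_requests) else acc)
      (pvStateOf b) = pvStateOf (pvBestFold l b) := by
  induction l generalizing b with
  | nil => simp [pvBestFold]
  | cons x t ih =>
      simp only [List.foldl_cons, pvBestFold]
      rw [show (pvStateOf b).2 = ((b.2.length : Int)) from rfl]
      by_cases h : ((b.2.length : Int)) < ((x.2.length : Int))
      · have hx : ¬ (x.2.length = 0) := by
          have : (0:Int) ≤ (b.2.length : Int) := by positivity
          omega
        simp only [gt_iff_lt, if_pos h]
        rw [show ((some x.1 : Option String), ((x.2.length : Int))) = pvStateOf x from by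
          simp [pvStateOf, hx]]
        simpa [pvBestFold] using ih x
      · simp only [gt_iff_lt, if_neg h]
        simpa [pvBestFold] using ih b

-- ===== VERDICT (by name: the statement is the Claim_ definition above) =====
theorem get_most_active_session_spec : Claim_equal_get_most_active_session := by
  unfold Claim_equal_get_most_active_session
  intro log _
  unfold Spec_get_most_active_session get_most_active_session get_most_active_session_alt
  cases log with
  | nil => rfl
  | cons x t =>
      simp only [List.map_cons]
      -- identify the head of B's ranked list
      have hB := head_sorted_rev (x.1, (x.2.length : Int))
        (t.map (fun kv => (kv.1, (kv.2.length : Int))))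
      rw [foldl_map_best] at hB
      -- A's fold
      simp only [List.foldl_cons]
      have h0 : (if ((x.2.length : Int)) > (0 : Int)
            then ((some x.1 : Option String), ((x.2.length : Int)))
            else ((none : Option String), (0 : Int))) = pvStateOf x := by
        by_cases hx : x.2.length = 0
        · simp [pvStateOf, hx]
        · have : ((x.2.length : Int)) > 0 := by omega
          simp [pvStateOf, hx]
      rw [h0, foldA_stateOf]
      -- compare
      cases hR : PySem.List.sorted ((x.1, (x.2.length : Int)) ::
          t.map (fun kv => (kv.1, (kv.2.length : Int)))) (fun kv => kv.2) true with
      | nil => exact absurd (by rw [hR] at hB; exact hB) (by simp)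
      | cons b rest =>
          rw [hR] at hB
          simp only [List.head?_cons, Option.some.injEq] at hB
          subst hB
          rcases hP : pvBestFold t x with ⟨u, es⟩
          by_cases h : es.length = 0
          · have he : es = [] := List.length_eq_zero_iff.mp h
            simp [pvStateOf, he]
          · simp [pvStateOf, Int.natCast_eq_zero, h]
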